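-- pv_equiv track=rewrite | github.com/TomaszSzostek/Molecular_docking | prepare_inputs/smiles_loader.py | _uniqueify_ids
-- ===== SOURCE A (Python) =====
-- from typing import Iterable
--
-- def _uniqueify_ids(ids: Iterable[str], existing: set[str]) -> list[str]:
--     """
--     Ensure each ID is unique by appending numeric suffixes to duplicates.
--
--     Parameters
--     ----------
--     ids : Iterable[str]
--         Original sequence of IDs from the CSV.
--     existing : set[str]
--         IDs (filenames) that already exist in the output directory.
--
--     Returns
--     -------
--     list[str]
--         New list of IDs guaranteed not to collide, e.g. ['lig', 'lig_1', ...].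
--     """
--     out = []
--     seen = set(existing)
--     for raw in ids:
--         base = raw
--         k = 0
--         new_id = base
--         # Append suffix until a unique ID is found
--         while new_id in seen:
--             k += 1
--             new_id = f"{base}_{k}"
--         seen.add(new_id)
--         out.append(new_id)
--     return out
-- ===== SOURCE B (Python) =====
-- def _parse_suffixed(name):
--     """If name == f"{base}_{k}" for some k >= 1 (canonical decimal: no leading
--     zero), return (base, k); otherwise None."""
--     i = len(name)
--     while i > 0 and name[i - 1].isdigit():
--         i -= 1
--     if i < len(name) and i > 0 and name[i - 1] == '_' and name[i] != '0':
--         v = 0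
--         for c in name[i:]:
--             v = v * 10 + (ord(c) - 48)
--         return name[:i - 1], v
--     return None
--
--
-- def _uniqueify_ids(ids, existing):
--     """Index-based version: instead of probing candidate name strings in a set,
--     parse every name once into per-base buckets of taken numeric suffixes and
--     pick the smallest free suffix with a resumable per-base counter."""
--     taken = {}  # base -> set of taken numeric suffixes (0 = the bare base)
--
--     def note(name):
--         taken.setdefault(name, set()).add(0)
--         p = _parse_suffixed(name)
--         if p is not None:
--             taken.setdefault(p[0], set()).add(p[1])
--
--     for name in existing:
--         note(name)
--
--     next_k = {}
--     out = []
--     for raw in ids: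
--         suf = taken.get(raw, set())
--         k = next_k.get(raw, 0)
--         while k in suf:
--             k += 1
--         next_k[raw] = k + 1
--         new_id = raw if k == 0 else f"{raw}_{k}"
--         note(new_id)
--         out.append(new_id)
--     return out
-- ===== Notes on version B (the rewrite author's own statement) =====
-- stated objective: faster
-- what changed: B never probes candidate name strings in a set: it parses every name once into per-base buckets of taken integer suffixes and picks the smallest free suffix with a resumable per-base counter, while A rebuilds and set-probes f"{base}_{k}" strings from k=1 for every duplicate.
import Mathlib
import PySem

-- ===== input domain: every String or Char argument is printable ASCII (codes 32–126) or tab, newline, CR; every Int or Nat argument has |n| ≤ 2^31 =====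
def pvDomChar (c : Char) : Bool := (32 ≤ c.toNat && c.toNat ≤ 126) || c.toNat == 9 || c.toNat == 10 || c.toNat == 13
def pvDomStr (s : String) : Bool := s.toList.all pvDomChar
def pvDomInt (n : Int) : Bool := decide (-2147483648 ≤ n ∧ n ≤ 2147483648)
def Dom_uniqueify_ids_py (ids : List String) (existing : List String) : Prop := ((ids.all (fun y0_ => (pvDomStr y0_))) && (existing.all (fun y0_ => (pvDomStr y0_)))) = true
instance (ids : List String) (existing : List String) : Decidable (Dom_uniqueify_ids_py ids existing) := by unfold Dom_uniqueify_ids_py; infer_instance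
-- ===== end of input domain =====

-- B replaces A's probe-candidate-strings-in-a-set search by a different data structure:
-- every name is parsed ONCE into per-base buckets of taken integer suffixes, and the
-- smallest free suffix is found by scanning integers from a resumable per-base counter.

-- ===== PORT A =====
-- the `while new_id in seen` loop; fuel |seen|+1 is enough, since among |seen|+1 distinct
-- candidate names one is free (proved below); within that fuel it is the literal loop
def uniqFindA (seen : PySem.Set String) (base : String) : Nat → Int → String → String
  | 0, _, newId => newId
  | fuel+1, k, newId =>
      if newId ∈ seen then uniqFindA seen base fuel (k+1) (base ++ "_" ++ PySem.Int.toStr (k+1))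
      else newId

def uniqStepA (st : List String × PySem.Set String) (raw : String) : List String × PySem.Set String :=
  let base := raw
  let newId := uniqFindA st.2 base (st.2.length + 1) 0 base
  (st.1 ++ [newId], PySem.Set.add st.2 newId)

def uniqueify_ids_py (ids : List String) (existing : List String) : List String :=
  (ids.foldl uniqStepA ([], PySem.Set.ofList existing)).1

-- ===== PORT B =====
-- `i = len(name); while i > 0 and name[i-1].isdigit(): i -= 1` (the argument is the current i)
def uniqRunStart (cs : List Char) : Nat → Nat
  | 0 => 0
  | i+1 => if PySem.Chars.isdigit (cs.getD i ' ') then uniqRunStart cs i else i+1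

-- _parse_suffixed: the trailing digit run, its preceding '_', and the manual decimal
-- decode loop `v = v*10 + (ord(c)-48)`; name[:i-1] / name[i-1] via take/getD (i-1 ≥ 0, in range)
def uniqParseAt (cs : List Char) (i : Nat) : Option (String × Int) :=
  if i < cs.length ∧ 0 < i ∧ cs.getD (i-1) ' ' = '_' ∧ cs.getD i ' ' ≠ '0' then
    some (String.ofList (cs.take (i-1)), (cs.drop i).foldl (fun v c => v * 10 + ((c.toNat : Int) - 48)) 0)
  else none

def uniqParse (s : String) : Option (String × Int) :=
  uniqParseAt s.toList (uniqRunStart s.toList s.toList.length)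

-- note(name): record suffix 0 for the bare name, and the parsed (base, k) if any
def uniqNote (d : PySem.Dict String (PySem.Set Int)) (name : String) : PySem.Dict String (PySem.Set Int) :=
  let d1 := d.insert name (PySem.Set.add (d.getD name PySem.Set.empty) 0)
  match uniqParse name with
  | some bv => d1.insert bv.1 (PySem.Set.add (d1.getD bv.1 PySem.Set.empty) bv.2)
  | none => d1

-- `while k in suf: k += 1`; fuel |suf|+1 is enough (pigeonhole, proved below)
def uniqScanK (suf : PySem.Set Int) : Nat → Int → Int
  | 0, k => k
  | f+1, k => if k ∈ suf then uniqScanK suf f (k+1) else k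

def uniqStepB (st : List String × PySem.Dict String (PySem.Set Int) × PySem.Dict String Int)
    (raw : String) : List String × PySem.Dict String (PySem.Set Int) × PySem.Dict String Int :=
  let suf := st.2.1.getD raw PySem.Set.empty
  let k := uniqScanK suf (suf.length + 1) (st.2.2.getD raw 0)
  let newId := if k == 0 then raw else raw ++ "_" ++ PySem.Int.toStr k
  (st.1 ++ [newId], uniqNote st.2.1 newId, st.2.2.insert raw (k + 1))

def uniqueify_ids_py_alt (ids : List String) (existing : List String) : List String :=
  (ids.foldl uniqStepB ([], existing.foldl uniqNote PySem.Dict.empty, PySem.Dict.empty)).1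

-- ===== PRECONDITION & SPEC =====
def Spec_uniqueify_ids_py (ids : List String) (existing : List String) (out : List String) : Prop := out = uniqueify_ids_py_alt ids existing
instance (ids : List String) (existing : List String) (out : List String) : Decidable (Spec_uniqueify_ids_py ids existing out) := by unfold Spec_uniqueify_ids_py; infer_instance

-- ===== CLAIM (what is proved, stated in full; the proofs are below) =====
def Claim_equal_uniqueify_ids_py : Prop := ∀ (ids : List String) (existing : List String), Dom_uniqueify_ids_py ids existing → Spec_uniqueify_ids_py ids existing (uniqueify_ids_py ids existing)

-- ===== LEMMAS AND PROOFS =====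

-- the candidate name for suffix k (k = 0 is the bare base)
def uniqName (b : String) (k : Int) : String :=
  if k = 0 then b else b ++ "_" ++ PySem.Int.toStr k

-- "note(name) records suffix k for base b"
def uniqMarks (s b : String) (k : Int) : Prop :=
  (k = 0 ∧ s = b) ∨ uniqParse s = some (b, k)

-- ---- digit characters ----

lemma uniq_digit_bounds (c : Char) (h : PySem.Chars.isdigit c = true) :
    48 ≤ c.toNat ∧ c.toNat ≤ 57 := by
  simp only [PySem.Chars.isdigit, Bool.and_eq_true, decide_eq_true_eq, Char.le_def,
    UInt32.le_iff_toNat_le] at h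
  simp only [Char.toNat]
  exact ⟨h.1, h.2⟩

lemma uniq_digitChar_roundtrip (c : Char) (h : PySem.Chars.isdigit c = true) :
    Nat.digitChar (c.toNat - 48) = c := by
  obtain ⟨h1, h2⟩ := uniq_digit_bounds c h
  have hc := Char.ofNat_toNat c
  interval_cases h3 : c.toNat <;> (rw [← hc]; decide)

lemma uniq_zero_char (c : Char) (h : c.toNat = 48) : c = '0' := by
  have hc := Char.ofNat_toNat c
  rw [h] at hc
  rw [← hc]

lemma uniq_digitChar_isdigit (m : Nat) (h : m < 10) :
    PySem.Chars.isdigit (Nat.digitChar m) = true := by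
  interval_cases m <;> decide

lemma uniq_digitChar_ne_zero (m : Nat) (h1 : 1 ≤ m) (h : m < 10) :
    Nat.digitChar m ≠ '0' := by
  interval_cases m <;> decide

-- ---- the decimal decoder (Nat form) and its roundtrips with Nat.toDigits ----

def uniqDecode (a : Nat) (cs : List Char) : Nat := cs.foldl (fun x c => x * 10 + (c.toNat - 48)) a

lemma uniqDecode_toDigits : ∀ n : Nat, uniqDecode 0 (Nat.toDigits 10 n) = n := by
  intro n
  induction n using Nat.strong_induction_on with
  | _ n ih =>
    rw [Nat.toDigits_eq_if (by omega)]
    split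
    · rename_i h
      have hd : ∀ m, m < 10 → (Nat.digitChar m).toNat - 48 = m := by decide
      simp [uniqDecode, hd n h]
    · rename_i h
      have h10 : n % 10 < 10 := Nat.mod_lt _ (by omega)
      have hd : ∀ m, m < 10 → (Nat.digitChar m).toNat - 48 = m := by decide
      have hrec := ih (n / 10) (by omega)
      simp only [uniqDecode, List.foldl_append, List.foldl_cons, List.foldl_nil] at *
      rw [hrec, hd _ h10]
      omega

lemma uniqDecode_pos : ∀ (cs : List Char) (a : Nat), 1 ≤ a → 1 ≤ uniqDecode a cs := by
  intro cs
  induction cs with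
  | nil => intro a ha; simpa [uniqDecode] using ha
  | cons c cs ih =>
    intro a ha
    simp only [uniqDecode, List.foldl_cons] at *
    exact ih _ (by omega)

lemma uniq_toDigits_decode : ∀ (cs : List Char), (∀ c ∈ cs, PySem.Chars.isdigit c = true) →
    ∀ a : Nat, 1 ≤ a → Nat.toDigits 10 (uniqDecode a cs) = Nat.toDigits 10 a ++ cs := by
  intro cs
  induction cs with
  | nil => intro _ a _; simp [uniqDecode]
  | cons c cs ih =>
    intro hdig a ha
    obtain ⟨hc1, hc2⟩ := uniq_digit_bounds c (hdig c (List.mem_cons_self ..))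
    have hstep : uniqDecode a (c :: cs) = uniqDecode (a * 10 + (c.toNat - 48)) cs := by
      simp [uniqDecode]
    rw [hstep, ih (fun x hx => hdig x (List.mem_cons_of_mem _ hx)) _ (by omega)]
    have hsplit : Nat.toDigits 10 (a * 10 + (c.toNat - 48)) =
        Nat.toDigits 10 a ++ [c] := by
      rw [Nat.toDigits_eq_if (b := 10) (by omega)]
      have hlt : ¬ a * 10 + (c.toNat - 48) < 10 := by omega
      rw [if_neg hlt]
      have hdiv : (a * 10 + (c.toNat - 48)) / 10 = a := by omega
      have hmod : (a * 10 + (c.toNat - 48)) % 10 = c.toNat - 48 := by omega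
      rw [hdiv, hmod, uniq_digitChar_roundtrip c (hdig c (List.mem_cons_self ..))]
    rw [hsplit, List.append_assoc]
    rfl

-- the Int decoder of the port equals the Nat decoder on digit strings
lemma uniqDecodeI_eq : ∀ (cs : List Char), (∀ c ∈ cs, PySem.Chars.isdigit c = true) →
    ∀ a : Nat, cs.foldl (fun v c => v * 10 + ((c.toNat : Int) - 48)) (a : Int) =
      ((uniqDecode a cs : Nat) : Int) := by
  intro cs
  induction cs with
  | nil => intro _ a; simp [uniqDecode]
  | cons c cs ih =>
    intro hdig a
    obtain ⟨hc1, _⟩ := uniq_digit_bounds c (hdig c (List.mem_cons_self ..))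
    have h1 : (a : Int) * 10 + ((c.toNat : Int) - 48) = ((a * 10 + (c.toNat - 48) : Nat) : Int) := by
      push_cast; omega
    simp only [List.foldl_cons, uniqDecode] at *
    rw [h1, ih (fun x hx => hdig x (List.mem_cons_of_mem _ hx))]

-- ---- str(k) for k ≥ 1: nonempty digit run without a leading zero ----

lemma uniq_toDigits_shape : ∀ n : Nat, 1 ≤ n →
    (∀ c ∈ Nat.toDigits 10 n, PySem.Chars.isdigit c = true) ∧
    ∃ c rest, Nat.toDigits 10 n = c :: rest ∧ c ≠ '0' := by
  intro n
  induction n using Nat.strong_induction_on with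
  | _ n ih =>
    intro hn
    rw [Nat.toDigits_eq_if (by omega)]
    split
    · rename_i h
      refine ⟨?_, Nat.digitChar n, [], rfl, uniq_digitChar_ne_zero n hn h⟩
      intro c hc
      rw [List.mem_singleton] at hc
      subst hc
      exact uniq_digitChar_isdigit n h
    · rename_i h
      have hd : n / 10 < n := by omega
      have hd1 : 1 ≤ n / 10 := by omega
      obtain ⟨ha, c, rest, heq, hc0⟩ := ih (n / 10) hd hd1
      constructor
      · intro x hx
        rw [List.mem_append] at hx
        rcases hx with hx | hx
        · exact ha x hx
        · rw [List.mem_singleton] at hx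
          subst hx
          exact uniq_digitChar_isdigit _ (Nat.mod_lt _ (by omega))
      · exact ⟨c, rest ++ [Nat.digitChar (n % 10)], by rw [heq]; rfl, hc0⟩

lemma uniq_toChars_pos (k : Int) (h : 1 ≤ k) :
    PySem.Int.toChars k = Nat.toDigits 10 k.toNat := by
  simp [PySem.Int.toChars, show ¬ k < 0 by omega]

-- ---- the digit-run scan: spec and uniqueness ----

lemma uniqRunStart_spec (cs : List Char) : ∀ n : Nat,
    uniqRunStart cs n ≤ n ∧
    (∀ j, uniqRunStart cs n ≤ j → j < n → PySem.Chars.isdigit (cs.getD j ' ') = true) ∧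
    (uniqRunStart cs n = 0 ∨ PySem.Chars.isdigit (cs.getD (uniqRunStart cs n - 1) ' ') = false) := by
  intro n
  induction n with
  | zero => exact ⟨le_refl _, fun j h1 h2 => absurd h2 (by omega), Or.inl rfl⟩
  | succ n ih =>
    simp only [uniqRunStart]
    split
    · rename_i h
      obtain ⟨i1, i2, i3⟩ := ih
      refine ⟨by omega, ?_, i3⟩
      intro j h1 h2
      by_cases hj : j = n
      · subst hj; exact h
      · exact i2 j h1 (by omega)
    · rename_i h
      exact ⟨le_refl _, fun j h1 h2 => absurd h2 (by omega),
        Or.inr (by simpa using Bool.eq_false_iff.mpr (fun hc => h hc))⟩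

lemma uniqRunStart_unique (cs : List Char) (n i : Nat) (hin : i ≤ n)
    (hall : ∀ j, i ≤ j → j < n → PySem.Chars.isdigit (cs.getD j ' ') = true)
    (hstop : i = 0 ∨ PySem.Chars.isdigit (cs.getD (i-1) ' ') = false) :
    uniqRunStart cs n = i := by
  obtain ⟨r1, r2, r3⟩ := uniqRunStart_spec cs n
  set r := uniqRunStart cs n with hr
  rcases lt_trichotomy r i with h | h | h
  · rcases hstop with h0 | hnd
    · omega
    · have := r2 (i-1) (by omega) (by omega)
      rw [this] at hnd; cases hnd
  · exact h
  · rcases r3 with h0 | hnd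
    · omega
    · have := hall (r-1) (by omega) (by omega)
      rw [this] at hnd; cases hnd

-- ---- the key characterisation: note marks (b,k) by s iff s is the k-th candidate of b ----

-- parse soundness: if _parse_suffixed(s) = (b, k) then s is literally b ++ "_" ++ str(k), k ≥ 1
lemma uniq_parse_sound (s b : String) (k : Int) (hp : uniqParse s = some (b, k)) :
    1 ≤ k ∧ s = uniqName b k := by
  unfold uniqParse uniqParseAt at hp
  set cs := s.toList with hcs
  set i := uniqRunStart cs cs.length with hi
  obtain ⟨r1, r2, _⟩ := uniqRunStart_spec cs cs.length
  rw [← hi] at r1 r2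
  split at hp
  case isFalse => cases hp
  case isTrue hcond =>
  obtain ⟨hil, hi0, hus, hz0⟩ := hcond
  rw [Option.some.injEq, Prod.mk.injEq] at hp
  obtain ⟨hb, hkv⟩ := hp
  -- the digit run
  set ds := cs.drop i with hds
  have hdig : ∀ c ∈ ds, PySem.Chars.isdigit c = true := by
    intro c hc
    rw [hds, List.mem_iff_getElem] at hc
    obtain ⟨j, hj, hcj⟩ := hc
    rw [List.getElem_drop] at hcj
    have hjl : i + j < cs.length := by
      rw [List.length_drop] at hj; omega
    have := r2 (i + j) (by omega) hjl
    rw [List.getD_eq_getElem cs ' ' hjl, hcj] at this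
    exact this
  have hne : ds ≠ [] := by
    rw [hds]
    intro h
    have := List.length_drop (l := cs) (i := i)
    rw [h] at this
    simp at this
    omega
  obtain ⟨c, rest, hcr⟩ := List.exists_cons_of_ne_nil hne
  have hhead : cs.getD i ' ' = c := by
    conv_lhs => rw [← List.take_append_drop i cs]
    rw [List.getD_append_right _ _ _ _ (by rw [List.length_take]; omega)]
    rw [List.length_take, min_eq_left (by omega), Nat.sub_self, ← hds, hcr]
    rfl
  have hcd : PySem.Chars.isdigit c = true := hdig c (by rw [hcr]; exact List.mem_cons_self ..)
  obtain ⟨hc48, hc57⟩ := uniq_digit_bounds c hcd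
  have hcne0 : c ≠ '0' := by rw [← hhead]; exact hz0
  have ha1 : 1 ≤ c.toNat - 48 := by
    rcases Nat.lt_or_ge 49 (c.toNat + 1) with h | h
    · omega
    · exact absurd (uniq_zero_char c (by omega)) hcne0
  -- the decoded value
  have hrestdig : ∀ x ∈ rest, PySem.Chars.isdigit x = true := by
    intro x hx; exact hdig x (by rw [hcr]; exact List.mem_cons_of_mem _ hx)
  set n := uniqDecode (c.toNat - 48) rest with hn
  have hn1 : 1 ≤ n := uniqDecode_pos rest _ ha1
  have hkn : k = (n : Int) := by
    rw [← hkv, hcr]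
    have h0 : (0 : Int) = ((0 : Nat) : Int) := rfl
    rw [List.foldl_cons, show (0 : Int) * 10 + ((c.toNat : Int) - 48) = ((c.toNat - 48 : Nat) : Int) by push_cast <;> omega]
    exact uniqDecodeI_eq rest hrestdig (c.toNat - 48)
  have hk1 : 1 ≤ k := by omega
  refine ⟨hk1, ?_⟩
  -- str(k) = the digit run
  have htd : Nat.toDigits 10 n = c :: rest := by
    have := uniq_toDigits_decode rest hrestdig (c.toNat - 48) ha1
    rw [← hn] at this
    rw [this, Nat.toDigits_eq_if (by omega), if_pos (by omega),
      uniq_digitChar_roundtrip c hcd]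
    rfl
  have hchars : PySem.Int.toChars k = ds := by
    rw [uniq_toChars_pos k hk1, hkn, Int.toNat_natCast, htd, hcr]
  -- reassemble s
  have hsplit : cs = cs.take (i-1) ++ '_' :: ds := by
    conv_lhs => rw [← List.take_append_drop (i-1) cs]
    congr 1
    rw [List.drop_eq_getElem_cons (by omega)]
    congr 1
    · rw [← List.getD_eq_getElem cs ' ' (by omega), hus]
    · rw [hds]
      congr 1
      omega
  have : s = uniqName b k := by
    rw [uniqName, if_neg (by omega)]
    have h1 : (b ++ "_" ++ PySem.Int.toStr k).toList = b.toList ++ '_' :: ds := by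
      simp only [String.toList_append, PySem.Int.toList_toStr, hchars]
      simp
    rw [← String.ofList_toList (s := s), ← String.ofList_toList (s := b ++ "_" ++ PySem.Int.toStr k), h1,
      ← hcs, hsplit, ← hb, String.toList_ofList]
  exact this

-- parse completeness: _parse_suffixed(b ++ "_" ++ str(k)) = (b, k) for k ≥ 1
lemma uniq_parse_complete (b : String) (k : Int) (hk : 1 ≤ k) :
    uniqParse (uniqName b k) = some (b, k) := by
  have hkn : k = ((k.toNat : Nat) : Int) := by omega
  obtain ⟨hdig, c, rest, hcr, hc0⟩ := uniq_toDigits_shape k.toNat (by omega)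
  set ds := Nat.toDigits 10 k.toNat with hds
  have hchars : PySem.Int.toChars k = ds := uniq_toChars_pos k hk
  have hlist : (uniqName b k).toList = b.toList ++ '_' :: ds := by
    rw [uniqName, if_neg (by omega)]
    simp only [String.toList_append, PySem.Int.toList_toStr, hchars]
    simp
  set cs := (uniqName b k).toList with hcs
  set m := b.toList.length with hm
  have hlen : cs.length = m + 1 + ds.length := by
    rw [hlist]; simp [hm]; omega
  have hdsne : ds ≠ [] := by rw [hcr]; exact List.cons_ne_nil _ _
  have hdslen : 1 ≤ ds.length := by
    rw [hcr]; simp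
  -- the run scan stops exactly at m + 1
  have hgetd : ∀ j, m + 1 ≤ j → j < cs.length → cs.getD j ' ' = ds.getD (j - (m+1)) ' ' := by
    intro j h1 h2
    rw [hlist, List.getD_append_right _ _ _ _ (by rw [← hm]; omega)]
    have he : j - b.toList.length = (j - (m+1)) + 1 := by rw [← hm]; omega
    rw [he]
    rfl
  have hus : cs.getD m ' ' = '_' := by
    rw [hlist, List.getD_append_right _ _ _ _ (by omega)]
    rw [← hm, Nat.sub_self]
    rfl
  have hrun : uniqRunStart cs cs.length = m + 1 := by
    apply uniqRunStart_unique cs cs.length (m+1) (by omega)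
    · intro j h1 h2
      rw [hgetd j h1 h2]
      have hjd : j - (m+1) < ds.length := by omega
      rw [List.getD_eq_getElem ds ' ' hjd]
      exact hdig _ (List.getElem_mem _)
    · right
      have : m + 1 - 1 = m := by omega
      rw [this, hus]
      decide
  have hheadd : cs.getD (m+1) ' ' = c := by
    rw [hgetd (m+1) (by omega) (by omega), Nat.sub_self, hcr]
    rfl
  unfold uniqParse uniqParseAt
  rw [← hcs, hrun]
  rw [if_pos ⟨by omega, by omega, by rw [Nat.add_sub_cancel, hus], by rw [hheadd]; exact hc0⟩]
  rw [Option.some.injEq, Prod.mk.injEq]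
  constructor
  · -- the base is recovered
    rw [Nat.add_sub_cancel, hlist, List.take_append_of_le_length (by omega), hm,
      List.take_length, String.ofList_toList]
  · -- the suffix decodes back to k
    have hdrop : cs.drop (m+1) = ds := by
      rw [hlist, hm]
      simp [List.drop_append]
    rw [hdrop]
    have h0 : (0 : Int) = ((0 : Nat) : Int) := rfl
    rw [h0, uniqDecodeI_eq ds hdig 0, uniqDecode_toDigits]
    omega

lemma uniq_marks_iff (s b : String) (k : Int) (hk : 0 ≤ k) :
    uniqMarks s b k ↔ s = uniqName b k := by
  constructor
  · rintro (⟨rfl, rfl⟩ | hp)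
    · rw [uniqName, if_pos rfl]
    · exact (uniq_parse_sound s b k hp).2
  · intro hs
    by_cases hk0 : k = 0
    · subst hk0
      rw [uniqName, if_pos rfl] at hs
      exact Or.inl ⟨rfl, hs⟩
    · exact Or.inr (hs ▸ uniq_parse_complete b k (by omega))

-- ---- what uniqNote and the initial fold put into the buckets ----

lemma uniq_note_mem (d : PySem.Dict String (PySem.Set Int)) (name b : String) (k : Int) :
    (k ∈ (uniqNote d name).getD b PySem.Set.empty) ↔
      (k ∈ d.getD b PySem.Set.empty ∨ uniqMarks name b k) := by
  unfold uniqNote uniqMarks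
  cases hp : uniqParse name with
  | none =>
    simp only [hp, PySem.Dict.getD_insert, PySem.Set.mem_add]
    by_cases hb : b = name <;> simp [hb, beq_iff_eq] <;> tauto
  | some bv =>
    obtain ⟨b1, v⟩ := bv
    simp only [hp, PySem.Dict.getD_insert, PySem.Set.mem_add, Option.some.injEq, Prod.mk.injEq]
    by_cases h1 : b = b1 <;> by_cases h2 : b = name <;> by_cases h3 : b1 = name <;>
      simp_all [beq_iff_eq] <;> tauto

lemma uniq_fold_note_mem (l : List String) (d : PySem.Dict String (PySem.Set Int))
    (b : String) (k : Int) :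
    (k ∈ (l.foldl uniqNote d).getD b PySem.Set.empty) ↔
      (k ∈ d.getD b PySem.Set.empty ∨ ∃ s ∈ l, uniqMarks s b k) := by
  induction l generalizing d with
  | nil => simp
  | cons x l ih =>
    rw [List.foldl_cons, ih]
    rw [uniq_note_mem]
    constructor
    · rintro ((h | h) | h)
      · exact Or.inl h
      · exact Or.inr ⟨x, List.mem_cons_self .., h⟩
      · obtain ⟨s, hs, hm⟩ := h
        exact Or.inr ⟨s, List.mem_cons_of_mem _ hs, hm⟩
    · rintro (h | ⟨s, hs, hm⟩)
      · exact Or.inl (Or.inl h)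
      · rcases List.mem_cons.mp hs with rfl | hs
        · exact Or.inl (Or.inr hm)
        · exact Or.inr ⟨s, hs, hm⟩

-- ---- abstract first-free-suffix scans (A over names, B over suffix ints) ----

def uniqFF (seen : List String) (b : String) : Nat → Int → Int
  | 0, k => k
  | f+1, k => if uniqName b k ∈ seen then uniqFF seen b f (k+1) else k

lemma uniqFindA_eq (seen : PySem.Set String) (b : String) :
    ∀ (f : Nat) (k : Int), 0 ≤ k →
      uniqFindA seen b f k (uniqName b k) = uniqName b (uniqFF seen b f k) := by
  intro f
  induction f with
  | zero => intro k hk; simp [uniqFindA, uniqFF]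
  | succ f ih =>
    intro k hk
    simp only [uniqFindA, uniqFF]
    split
    · have h1 : k + 1 ≠ 0 := by omega
      have : b ++ "_" ++ PySem.Int.toStr (k+1) = uniqName b (k+1) := by simp [uniqName, h1]
      rw [this, ih (k+1) (by omega)]
    · rfl

-- decimal injectivity, for the pigeonhole argument on A's side
lemma uniqToStr_inj {i j : Int} (hi : 0 < i) (hj : 0 < j)
    (h : PySem.Int.toChars i = PySem.Int.toChars j) : i = j := by
  have h' := h
  simp only [PySem.Int.toChars, if_neg (by omega : ¬ i < 0), if_neg (by omega : ¬ j < 0)] at h'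
  have := congrArg (uniqDecode 0) h'
  rw [uniqDecode_toDigits, uniqDecode_toDigits] at this
  omega

lemma uniqName_inj {b : String} {i j : Int} (hi : 0 ≤ i) (hj : 0 ≤ j)
    (h : uniqName b i = uniqName b j) : i = j := by
  by_cases hi0 : i = 0 <;> by_cases hj0 : j = 0
  · omega
  · exfalso
    rw [uniqName, if_pos hi0, uniqName, if_neg hj0] at h
    have h' := congrArg (fun s => s.toList.length) h
    simp [String.toList_append] at h'
  · exfalso
    rw [uniqName, if_neg hi0, uniqName, if_pos hj0] at h
    have h' := congrArg (fun s => s.toList.length) h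
    simp [String.toList_append] at h'
  · rw [uniqName, if_neg hi0, uniqName, if_neg hj0] at h
    have h' := congrArg String.toList h
    simp only [String.toList_append] at h'
    have h2 : (PySem.Int.toStr i).toList = (PySem.Int.toStr j).toList :=
      List.append_cancel_left h'
    rw [PySem.Int.toList_toStr, PySem.Int.toList_toStr] at h2
    exact uniqToStr_inj (by omega) (by omega) h2

-- pigeonhole: among |seen|+1 distinct candidates one is not in seen
lemma uniqFree (seen : List String) (b : String) (k : Int) (hk : 0 ≤ k) :
    ∃ j : Int, k ≤ j ∧ j - k ≤ (seen.length : Int) ∧ uniqName b j ∉ seen := by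
  by_contra hcon
  push_neg at hcon
  set L := (List.range (seen.length + 1)).map (fun i : Nat => uniqName b (k + (i : Int))) with hL
  have hnd : L.Nodup := by
    refine List.Nodup.map_on ?_ (List.nodup_range)
    intro x _ y _ hxy
    have := uniqName_inj (b := b) (i := k + x) (j := k + y) (by omega) (by omega) hxy
    omega
  have hsub : ∀ x ∈ L, x ∈ seen := by
    intro x hx
    rw [hL, List.mem_map] at hx
    obtain ⟨i, hi, rfl⟩ := hx
    rw [List.mem_range] at hi
    exact hcon (k + i) (by omega) (by omega)
  have hlen : L.length ≤ seen.length := by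
    have h1 : L.toFinset.card = L.length := List.toFinset_card_of_nodup hnd
    have h2 : L.toFinset ⊆ seen.toFinset := by
      intro x hx
      rw [List.mem_toFinset] at hx ⊢
      exact hsub x hx
    have h3 : seen.toFinset.card ≤ seen.length := seen.toFinset_card_le
    have := Finset.card_le_card h2
    omega
  rw [hL] at hlen
  simp at hlen

-- pigeonhole on integers: among |suf|+1 consecutive ints one is not in suf
lemma uniqIntFree (suf : List Int) (k : Int) :
    ∃ j : Int, k ≤ j ∧ j - k ≤ (suf.length : Int) ∧ j ∉ suf := by
  by_contra hcon
  push_neg at hcon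
  set L := (List.range (suf.length + 1)).map (fun i : Nat => k + (i : Int)) with hL
  have hnd : L.Nodup := by
    refine List.Nodup.map_on ?_ (List.nodup_range)
    intro x _ y _ hxy
    omega
  have hsub : ∀ x ∈ L, x ∈ suf := by
    intro x hx
    rw [hL, List.mem_map] at hx
    obtain ⟨i, hi, rfl⟩ := hx
    rw [List.mem_range] at hi
    exact hcon (k + i) (by omega) (by omega)
  have hlen : L.length ≤ suf.length := by
    have h1 : L.toFinset.card = L.length := List.toFinset_card_of_nodup hnd
    have h2 : L.toFinset ⊆ suf.toFinset := by
      intro x hx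
      rw [List.mem_toFinset] at hx ⊢
      exact hsub x hx
    have h3 : suf.toFinset.card ≤ suf.length := suf.toFinset_card_le
    have := Finset.card_le_card h2
    omega
  rw [hL] at hlen
  simp at hlen

-- what A's scan computes, given enough fuel: the smallest free suffix ≥ k
lemma uniqFF_spec (seen : List String) (b : String) :
    ∀ (f : Nat) (k : Int), 0 ≤ k →
      (∃ j : Int, k ≤ j ∧ j - k < (f : Int) ∧ uniqName b j ∉ seen) →
      k ≤ uniqFF seen b f k ∧
        (∀ j : Int, k ≤ j → j < uniqFF seen b f k → uniqName b j ∈ seen) ∧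
        uniqName b (uniqFF seen b f k) ∉ seen := by
  intro f
  induction f with
  | zero =>
    rintro k hk ⟨j, hj1, hj2, _⟩
    exfalso; omega
  | succ f ih =>
    rintro k hk ⟨j, hj1, hj2, hj3⟩
    simp only [uniqFF]
    split
    · rename_i hmem
      have hjk : j ≠ k := fun h => hj3 (h ▸ hmem)
      obtain ⟨ih1, ih2, ih3⟩ := ih (k+1) (by omega) ⟨j, by omega, by push_cast at hj2 ⊢; omega, hj3⟩
      refine ⟨by omega, ?_, ih3⟩
      intro j' h1 h2
      by_cases hj' : j' = k
      · exact hj' ▸ hmem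
      · exact ih2 j' (by omega) h2
    · rename_i hmem
      exact ⟨le_refl _, fun j' h1 h2 => absurd h2 (by omega), hmem⟩

-- what B's scan computes, given enough fuel: the smallest suffix ≥ k not in suf
lemma uniqScanK_spec (suf : List Int) :
    ∀ (f : Nat) (k : Int),
      (∃ j : Int, k ≤ j ∧ j - k < (f : Int) ∧ j ∉ suf) →
      k ≤ uniqScanK suf f k ∧
        (∀ j : Int, k ≤ j → j < uniqScanK suf f k → j ∈ suf) ∧
        uniqScanK suf f k ∉ suf := by
  intro f
  induction f with
  | zero =>
    rintro k ⟨j, hj1, hj2, _⟩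
    exfalso; omega
  | succ f ih =>
    rintro k ⟨j, hj1, hj2, hj3⟩
    simp only [uniqScanK]
    split
    · rename_i hmem
      have hjk : j ≠ k := fun h => hj3 (h ▸ hmem)
      obtain ⟨ih1, ih2, ih3⟩ := ih (k+1) ⟨j, by omega, by push_cast at hj2 ⊢; omega, hj3⟩
      refine ⟨by omega, ?_, ih3⟩
      intro j' h1 h2
      by_cases hj' : j' = k
      · exact hj' ▸ hmem
      · exact ih2 j' (by omega) h2
    · rename_i hmem
      exact ⟨le_refl _, fun j' h1 h2 => absurd h2 (by omega), hmem⟩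

-- the two scans find the same suffix when the buckets mirror seen and every
-- suffix below the resume point is already taken
lemma uniq_scans_agree (seen : List String) (suf : List Int) (b : String) (k0 : Int)
    (hk0 : 0 ≤ k0)
    (H : ∀ j : Int, 0 ≤ j → (j ∈ suf ↔ uniqName b j ∈ seen))
    (hchain : ∀ j : Int, 0 ≤ j → j < k0 → uniqName b j ∈ seen) :
    uniqScanK suf (suf.length + 1) k0 = uniqFF seen b (seen.length + 1) 0 := by
  obtain ⟨j0, hj01, hj02, hj03⟩ := uniqFree seen b 0 (by omega)
  obtain ⟨js, hjs1, hjs2, hjs3⟩ := uniqIntFree suf k0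
  obtain ⟨a1, a2, a3⟩ := uniqFF_spec seen b (seen.length + 1) 0 (by omega)
    ⟨j0, hj01, by push_cast; omega, hj03⟩
  obtain ⟨b1, b2, b3⟩ := uniqScanK_spec suf (suf.length + 1) k0
    ⟨js, hjs1, by push_cast; omega, hjs3⟩
  set rA := uniqFF seen b (seen.length + 1) 0
  set rB := uniqScanK suf (suf.length + 1) k0
  have hrB0 : 0 ≤ rB := by omega
  have hAk0 : k0 ≤ rA := by
    by_contra h
    exact a3 (hchain rA a1 (by omega))
  rcases lt_trichotomy rA rB with h | h | h
  · exact absurd ((H rA a1).mp (b2 rA hAk0 h)) a3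
  · exact h.symm
  · exact absurd ((H rB hrB0).mpr (a2 rB hrB0 h)) b3

-- ---- the main loop invariant ----

lemma uniq_loop_eq : ∀ (ids out : List String) (seen : PySem.Set String)
    (taken : PySem.Dict String (PySem.Set Int)) (nk : PySem.Dict String Int),
    (∀ b k, 0 ≤ k → ((k ∈ taken.getD b PySem.Set.empty) ↔ uniqName b k ∈ seen)) →
    (∀ b, 0 ≤ nk.getD b 0 ∧ ∀ j : Int, 0 ≤ j → j < nk.getD b 0 → uniqName b j ∈ seen) →
    (ids.foldl uniqStepA (out, seen)).1 = (ids.foldl uniqStepB (out, taken, nk)).1 := by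
  intro ids
  induction ids with
  | nil => intro out seen taken nk _ _; rfl
  | cons raw ids ih =>
    intro out seen taken nk Ha Hb
    obtain ⟨hk0, hchain⟩ := Hb raw
    simp only [List.foldl_cons]
    -- A's step result
    have hA : uniqStepA (out, seen) raw =
        (out ++ [uniqName raw (uniqFF seen raw (seen.length + 1) 0)],
         PySem.Set.add seen (uniqName raw (uniqFF seen raw (seen.length + 1) 0))) := by
      have h0 : (raw : String) = uniqName raw 0 := by simp [uniqName]
      simp only [uniqStepA]
      rw [show uniqFindA seen raw (seen.length + 1) 0 raw
            = uniqFindA seen raw (seen.length + 1) 0 (uniqName raw 0) from by rw [← h0],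
          uniqFindA_eq seen raw (seen.length + 1) 0 (by omega)]
    set suf := taken.getD raw PySem.Set.empty with hsuf
    have hscan : uniqScanK suf (suf.length + 1) (nk.getD raw 0)
        = uniqFF seen raw (seen.length + 1) 0 :=
      uniq_scans_agree seen suf raw (nk.getD raw 0) hk0
        (fun j hj => Ha raw j hj) hchain
    set r := uniqFF seen raw (seen.length + 1) 0 with hr
    obtain ⟨j0, hj01, hj02, hj03⟩ := uniqFree seen raw 0 (by omega)
    obtain ⟨p1, p2, p3⟩ := uniqFF_spec seen raw (seen.length + 1) 0 (by omega)
      ⟨j0, hj01, by push_cast; omega, hj03⟩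
    rw [← hr] at p1 p2 p3
    -- B's step result
    have hB : uniqStepB (out, taken, nk) raw =
        (out ++ [uniqName raw r], uniqNote taken (uniqName raw r), nk.insert raw (r + 1)) := by
      simp only [uniqStepB, ← hsuf, hscan]
      have hst : (if r == 0 then raw else raw ++ "_" ++ PySem.Int.toStr r) = uniqName raw r := by
        simp only [uniqName, beq_iff_eq]
      rw [hst]
    rw [hA, hB]
    apply ih
    · intro b k hk
      rw [uniq_note_mem, Ha b k hk, uniq_marks_iff _ _ _ hk, PySem.Set.mem_add]
      constructor
      · rintro (h | h)
        · exact Or.inl h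
        · exact Or.inr h.symm
      · rintro (h | h)
        · exact Or.inl h
        · exact Or.inr h.symm
    · intro b
      rw [PySem.Dict.getD_insert]
      split
      · rename_i hb
        subst hb
        refine ⟨by omega, ?_⟩
        intro j h1 h2
        rw [PySem.Set.mem_add]
        by_cases hjr : j = r
        · exact Or.inr (by rw [hjr])
        · exact Or.inl (p2 j h1 (by omega))
      · rename_i hb
        obtain ⟨q1, q2⟩ := Hb b
        refine ⟨q1, ?_⟩
        intro j h1 h2
        rw [PySem.Set.mem_add]
        exact Or.inl (q2 j h1 h2)

-- ===== VERDICT (by name: the statement is the Claim_ definition above) =====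
theorem uniqueify_ids_py_spec : Claim_equal_uniqueify_ids_py := by
  intro ids existing _
  unfold Spec_uniqueify_ids_py uniqueify_ids_py uniqueify_ids_py_alt
  apply uniq_loop_eq
  · intro b k hk
    rw [uniq_fold_note_mem]
    simp only [PySem.Dict.getD_empty]
    constructor
    · rintro (h | ⟨s, hs, hm⟩)
      · simp [PySem.Set.empty] at h
      · rw [uniq_marks_iff _ _ _ hk] at hm
        subst hm
        exact (PySem.Set.mem_ofList _ _).mpr hs
    · intro h
      exact Or.inr ⟨uniqName b k, (PySem.Set.mem_ofList _ _).mp h, (uniq_marks_iff _ _ _ hk).mpr rfl⟩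
  · intro b
    refine ⟨by simp [PySem.Dict.getD_empty], ?_⟩
    intro j h1 h2
    simp [PySem.Dict.getD_empty] at h2
    omega
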